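-- pv_equiv track=rewrite | github.com/pekeng/geetest | geetest_break.py | fun_c
-- ===== SOURCE A (Python) =====
-- def fun_c(a):
--     g = []
--     e = []
--     f = 0
--     for h in range(len(a) - 1):
--         b = int(round(a[h + 1][0] - a[h][0]))
--         c = int(round(a[h + 1][1] - a[h][1]))
--         d = int(round(a[h + 1][2] - a[h][2]))
--         g.append([b, c, d])
--
--         if b == c == d == 0:
--             pass
--         else:
--             if b == 0 and c == 0:
--                 f += d
--             else:
--                 e.append([b, c, d + f])
--                 f = 0
--     if f != 0:
--         e.append([b, c, f])
--     return e
-- ===== SOURCE B (Python) =====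
-- def fun_c(a):
--     diffs = [[int(round(a[i + 1][k] - a[i][k])) for k in (0, 1, 2)] for i in range(len(a) - 1)]
--     # prefix sums of the third components
--     S = [0]
--     for v in diffs:
--         S.append(S[-1] + v[2])
--     # positions whose vector must be emitted
--     emits = [i for i in range(len(diffs)) if diffs[i][0] != 0 or diffs[i][1] != 0]
--     # each emitted entry absorbs the d-sum of the whole gap since the previous emit
--     e = [[diffs[i][0], diffs[i][1], S[i + 1] - S[q]]
--          for q, i in zip([0] + [j + 1 for j in emits], emits)]
--     tail = S[len(diffs)] - (S[emits[-1] + 1] if emits else 0)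
--     if tail != 0:
--         e.append([diffs[-1][0], diffs[-1][1], tail])
--     return e
-- ===== Notes on version B (the rewrite author's own statement) =====
-- stated objective: alternative
-- what changed: A's single fused accumulator loop (whose final flush relies on leftover loop variables b,c and running f) is replaced by a staged index-based algorithm: build the difference vectors, a prefix-sum array of their third components, and the list of emit positions, then produce each output entry directly as S[i+1]-S[q] between consecutive emit positions, with the tail flush computed from the prefix sums after the last emit.
import Mathlib
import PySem

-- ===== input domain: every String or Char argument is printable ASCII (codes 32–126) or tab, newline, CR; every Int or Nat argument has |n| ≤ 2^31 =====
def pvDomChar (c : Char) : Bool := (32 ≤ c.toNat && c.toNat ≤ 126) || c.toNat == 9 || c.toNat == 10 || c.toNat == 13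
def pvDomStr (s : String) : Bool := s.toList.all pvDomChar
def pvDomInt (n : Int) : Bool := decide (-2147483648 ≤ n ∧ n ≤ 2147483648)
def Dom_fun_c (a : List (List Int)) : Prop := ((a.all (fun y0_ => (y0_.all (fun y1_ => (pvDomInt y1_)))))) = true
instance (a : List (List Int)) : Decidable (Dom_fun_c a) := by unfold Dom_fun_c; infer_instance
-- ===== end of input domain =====

-- B replaces A's single fused accumulator loop (with leftover b,c loop state and running f) by a
-- staged index-based algorithm: difference vectors, a prefix-sum array of third components, the
-- list of emit positions, and each output entry computed directly as S[i+1]-S[q] between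
-- consecutive emit positions (tail flush read off the prefix sums after the last emit).


-- ===== PORT A =====
-- a[h][k] for indices guaranteed in range by Pre_fun_c (exact there; int(round(x-y)) on ints is x-y)
def pvAt (a : List (List Int)) (i k : Nat) : Int := (a.getD i []).getD k 0

def fun_c (a : List (List Int)) : List (List Int) :=
  -- state (e, f, b, c): Python's e, f and the loop variables b, c surviving the loop
  let s := (List.range (a.length - 1)).foldl
    (fun (s : List (List Int) × Int × Int × Int) h =>
      let b := pvAt a (h + 1) 0 - pvAt a h 0
      let c := pvAt a (h + 1) 1 - pvAt a h 1
      let d := pvAt a (h + 1) 2 - pvAt a h 2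
      if b = 0 ∧ c = 0 ∧ d = 0 then (s.1, s.2.1, b, c)
      else if b = 0 ∧ c = 0 then (s.1, s.2.1 + d, b, c)
      else (s.1 ++ [[b, c, d + s.2.1]], 0, b, c))
    ([], 0, 0, 0)
  if s.2.1 ≠ 0 then s.1 ++ [[s.2.2.1, s.2.2.2, s.2.1]] else s.1

-- ===== PORT B =====
-- v[0] != 0 or v[1] != 0
def pvEmit (v : List Int) : Bool := decide (v.getD 0 0 ≠ 0) || decide (v.getD 1 0 ≠ 0)

def fun_c_alt (a : List (List Int)) : List (List Int) :=
  let diffs := (List.range (a.length - 1)).map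
    (fun i => ([0, 1, 2] : List Nat).map (fun k => pvAt a (i + 1) k - pvAt a i k))
  -- S = [0]; for v in diffs: S.append(S[-1] + v[2])
  let S := diffs.foldl (fun (S : List Int) v => S ++ [S.getLastD 0 + v.getD 2 0]) [0]
  -- emits = [i for i in range(len(diffs)) if diffs[i][0] != 0 or diffs[i][1] != 0]
  -- (indices are nonnegative, so range(len(diffs)) is ported as List.range)
  let emits := (List.range diffs.length).filter (fun i => pvEmit (diffs.getD i []))
  -- e = [[diffs[i][0], diffs[i][1], S[i+1] - S[q]] for q, i in zip([0] + [j+1 for j in emits], emits)]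
  let e := (List.zip (0 :: emits.map (· + 1)) emits).map
    (fun qi => [(diffs.getD qi.2 []).getD 0 0, (diffs.getD qi.2 []).getD 1 0,
                S.getD (qi.2 + 1) 0 - S.getD qi.1 0])
  let tail := S.getD diffs.length 0 -
    (match emits.getLast? with | some j => S.getD (j + 1) 0 | none => 0)
  if tail ≠ 0 then
    let last := diffs.getLast?.getD [0, 0, 0]  -- diffs[-1]; nonempty whenever tail ≠ 0
    e ++ [[last.getD 0 0, last.getD 1 0, tail]]
  else e

-- ===== PRECONDITION & SPEC =====
-- Pre_ excludes exactly the inputs where Python A raises IndexError: some row shorter than 3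
-- while the loop body runs (len(a) ≥ 2).
def Pre_fun_c (a : List (List Int)) : Prop := a.length ≤ 1 ∨ ∀ x ∈ a, 3 ≤ x.length
instance (a : List (List Int)) : Decidable (Pre_fun_c a) := by unfold Pre_fun_c; infer_instance
def pvWitness_fun_c : List (List Int) := [[1, 2, 3], [1, 2, 5], [2, 2, 5]]

def Spec_fun_c (a : List (List Int)) (out : List (List Int)) : Prop := out = fun_c_alt a
instance (a : List (List Int)) (out : List (List Int)) : Decidable (Spec_fun_c a out) := by unfold Spec_fun_c; infer_instance

-- ===== CLAIM (what is proved, stated in full; the proofs are below) =====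
def Claim_equal_fun_c : Prop := ∀ (a : List (List Int)), Dom_fun_c a → Pre_fun_c a → Spec_fun_c a (fun_c a)

-- ===== LEMMAS AND PROOFS =====

-- the two fold steps and the difference vector, named for the proof
def stepA (a : List (List Int)) (s : List (List Int) × Int × Int × Int) (h : Nat) :
    List (List Int) × Int × Int × Int :=
  let b := pvAt a (h + 1) 0 - pvAt a h 0
  let c := pvAt a (h + 1) 1 - pvAt a h 1
  let d := pvAt a (h + 1) 2 - pvAt a h 2
  if b = 0 ∧ c = 0 ∧ d = 0 then (s.1, s.2.1, b, c)
  else if b = 0 ∧ c = 0 then (s.1, s.2.1 + d, b, c)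
  else (s.1 ++ [[b, c, d + s.2.1]], 0, b, c)

def stepB (s : List (List Int) × Int) (v : List Int) : List (List Int) × Int :=
  if v.getD 0 0 = 0 ∧ v.getD 1 0 = 0 ∧ v.getD 2 0 = 0 then s
  else if v.getD 0 0 = 0 ∧ v.getD 1 0 = 0 then (s.1, s.2 + v.getD 2 0)
  else (s.1 ++ [[v.getD 0 0, v.getD 1 0, v.getD 2 0 + s.2]], 0)

def dvec (a : List (List Int)) (i : Nat) : List Int :=
  ([0, 1, 2] : List Nat).map (fun k => pvAt a (i + 1) k - pvAt a i k)

-- recursive characterisations of the fold state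
def emitList : List (List Int) → Int → List (List Int)
  | [], _ => []
  | v :: t, f =>
    if pvEmit v then [v.getD 0 0, v.getD 1 0, v.getD 2 0 + f] :: emitList t 0
    else emitList t (f + v.getD 2 0)

def tailSum : List (List Int) → Int → Int
  | [], f => f
  | v :: t, f => if pvEmit v then tailSum t 0 else tailSum t (f + v.getD 2 0)

def sumTo (ds : List (List Int)) (q : Nat) : Int := ((ds.take q).map (fun v => v.getD 2 0)).sum

def scanD : List (List Int) → Int → List Int
  | [], _ => []
  | v :: t, x => (x + v.getD 2 0) :: scanD t (x + v.getD 2 0)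

def emIx (ds : List (List Int)) : List Nat :=
  (List.range ds.length).filter (fun i => pvEmit (ds.getD i []))

lemma stepA_dvec (a : List (List Int)) (s : List (List Int) × Int × Int × Int) (h : Nat) :
    stepA a s h = ((stepB (s.1, s.2.1) (dvec a h)).1, (stepB (s.1, s.2.1) (dvec a h)).2,
      (dvec a h).getD 0 0, (dvec a h).getD 1 0) := by
  simp only [stepA, stepB, dvec, List.map_cons, List.map_nil, List.getD_cons_zero,
    List.getD_cons_succ]
  split_ifs <;> rfl

lemma fold_inv (a : List (List Int)) (l : List Nat) (e : List (List Int)) (f b c : Int) :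
    List.foldl (stepA a) (e, f, b, c) l =
      ((List.foldl stepB (e, f) (l.map (dvec a))).1,
       (List.foldl stepB (e, f) (l.map (dvec a))).2,
       match (l.map (dvec a)).getLast? with
       | none => b
       | some v => v.getD 0 0,
       match (l.map (dvec a)).getLast? with
       | none => c
       | some v => v.getD 1 0) := by
  induction l generalizing e f b c with
  | nil => rfl
  | cons h t ih =>
    simp only [List.map_cons, List.foldl_cons, stepA_dvec]
    rcases t with _ | ⟨h2, t2⟩
    · simp [List.getLast?]
    · simp only [List.map_cons] at ih ⊢
      rw [ih]
      rcases hg : (dvec a h2 :: List.map (dvec a) t2).getLast? with _ | v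
      · exact absurd (List.getLast?_eq_none_iff.mp hg) (List.cons_ne_nil _ _)
      · simp [List.getLast?_cons_cons, hg]

lemma foldB_char (ds : List (List Int)) (e : List (List Int)) (f : Int) :
    List.foldl stepB (e, f) ds = (e ++ emitList ds f, tailSum ds f) := by
  induction ds generalizing e f with
  | nil => simp [emitList, tailSum]
  | cons v t ih =>
    rw [List.foldl_cons]
    by_cases h1 : v.getD 0 0 = 0 ∧ v.getD 1 0 = 0 ∧ v.getD 2 0 = 0
    · rw [show stepB (e, f) v = (e, f) from if_pos h1, ih]
      have he : pvEmit v = false := by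
        simp [pvEmit]
        exact ⟨h1.1, h1.2.1⟩
      have he' : pvEmit v ≠ true := by simp [he]
      simp only [emitList, tailSum, if_neg he', h1.2.2, add_zero]
    · by_cases h2 : v.getD 0 0 = 0 ∧ v.getD 1 0 = 0
      · rw [show stepB (e, f) v = (e, f + v.getD 2 0) from (if_neg h1).trans (if_pos h2), ih]
        have he : pvEmit v = false := by
          simp [pvEmit]
          exact ⟨h2.1, h2.2⟩
        have he' : pvEmit v ≠ true := by simp [he]
        simp only [emitList, tailSum, if_neg he']
      · rw [show stepB (e, f) v = (e ++ [[v.getD 0 0, v.getD 1 0, v.getD 2 0 + f]], 0) from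
              (if_neg h1).trans (if_neg h2), ih]
        have he : pvEmit v = true := by
          simp only [pvEmit, Bool.or_eq_true, decide_eq_true_eq]
          exact not_and_or.mp h2
        simp only [emitList, tailSum, if_pos he, List.append_assoc, List.singleton_append]

lemma sumTo_zero (ds : List (List Int)) : sumTo ds 0 = 0 := rfl

lemma sumTo_cons (v : List Int) (t : List (List Int)) (q : Nat) :
    sumTo (v :: t) (q + 1) = v.getD 2 0 + sumTo t q := by
  simp [sumTo, List.take_succ_cons]

lemma scanD_foldl (ds : List (List Int)) (S0 : List Int) (x : Int) :
    List.foldl (fun (S : List Int) v => S ++ [S.getLastD 0 + v.getD 2 0]) (S0 ++ [x]) ds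
      = S0 ++ [x] ++ scanD ds x := by
  induction ds generalizing S0 x with
  | nil => simp [scanD]
  | cons v t ih =>
    simp only [List.foldl_cons, List.getLastD_concat]
    rw [ih (S0 ++ [x]) (x + v.getD 2 0)]
    simp [scanD, List.append_assoc]

lemma getD_scanD (ds : List (List Int)) (x : Int) (q : Nat) (hq : q ≤ ds.length) :
    (x :: scanD ds x).getD q 0 = x + sumTo ds q := by
  induction ds generalizing x q with
  | nil =>
    have : q = 0 := Nat.le_zero.mp hq
    subst this
    simp [scanD, sumTo]
  | cons v t ih =>
    cases q with
    | zero => simp [sumTo]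
    | succ q =>
      have hq' : q ≤ t.length := by simpa using hq
      simp only [scanD, List.getD_cons_succ, sumTo_cons]
      rw [ih (x + v.getD 2 0) q hq']
      ring

lemma emIx_cons (v : List Int) (t : List (List Int)) :
    emIx (v :: t) = if pvEmit v then 0 :: (emIx t).map (· + 1) else (emIx t).map (· + 1) := by
  have hru : List.range (t.length + 1) = 0 :: (List.range t.length).map (· + 1) := by
    simp [List.range_succ_eq_map]
  have hf : List.filter ((fun i => pvEmit ((v :: t).getD i [])) ∘ (· + 1)) (List.range t.length)
      = List.filter (fun i => pvEmit (t.getD i [])) (List.range t.length) :=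
    List.filter_congr (fun i _ => by simp)
  simp only [emIx, List.length_cons, hru, List.filter_cons, List.getD_cons_zero,
    List.filter_map, hf]

lemma mem_emIx_lt (ds : List (List Int)) (i : Nat) (h : i ∈ emIx ds) : i < ds.length := by
  have h1 := (List.mem_filter.mp h).1
  exact List.mem_range.mp h1

lemma emitList_char (ds : List (List Int)) (f : Int) :
    emitList ds f =
      (List.zip ((-f) :: (emIx ds).map (fun j => sumTo ds (j + 1))) (emIx ds)).map
        (fun p => [(ds.getD p.2 []).getD 0 0, (ds.getD p.2 []).getD 1 0,
                   sumTo ds (p.2 + 1) - p.1]) := by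
  induction ds generalizing f with
  | nil => simp [emitList, emIx]
  | cons v t ih =>
    rw [emIx_cons]
    by_cases h : pvEmit v
    · rw [if_pos h]
      have hfst : (0 :: (emIx t).map (· + 1)).map (fun j => sumTo (v :: t) (j + 1))
          = ((-(0 : Int)) :: (emIx t).map (fun j => sumTo t (j + 1))).map
              (fun x => v.getD 2 0 + x) := by
        simp only [List.map_cons, List.map_map]
        refine congrArg₂ List.cons ?_ (List.map_congr_left fun j _ => ?_)
        · simp [sumTo]
        · simp only [Function.comp]
          rw [sumTo_cons]
      have hL : emitList (v :: t) f
          = [v.getD 0 0, v.getD 1 0, v.getD 2 0 + f] :: emitList t 0 := by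
        simp [emitList, h]
      rw [hL, ih 0, hfst, List.zip_cons_cons, List.map_cons]
      refine congrArg₂ List.cons ?_ ?_
      · simp [sumTo, sub_neg_eq_add]
      · rw [List.zip_map, List.map_map]
        refine List.map_congr_left fun p _ => ?_
        simp only [Function.comp, Prod.map, List.getD_cons_succ, sumTo_cons]
        refine congrArg₂ List.cons rfl (congrArg₂ List.cons rfl (congrArg₂ List.cons ?_ rfl))
        ring
    · rw [if_neg h]
      have hfst : ((emIx t).map (· + 1)).map (fun j => sumTo (v :: t) (j + 1))
          = ((emIx t).map (fun j => sumTo t (j + 1))).map (fun x => v.getD 2 0 + x) := by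
        simp only [List.map_map]
        refine List.map_congr_left fun j _ => ?_
        simp only [Function.comp]
        rw [sumTo_cons]
      have hL : emitList (v :: t) f = emitList t (f + v.getD 2 0) := by
        simp [emitList, h]
      have hneg : ((-f) : Int) = v.getD 2 0 + (-(f + v.getD 2 0)) := by ring
      rw [hL, ih (f + v.getD 2 0), hfst, hneg]
      rw [show (v.getD 2 0 + -(f + v.getD 2 0)) ::
            ((emIx t).map (fun j => sumTo t (j + 1))).map (fun x => v.getD 2 0 + x)
          = ((-(f + v.getD 2 0)) :: (emIx t).map (fun j => sumTo t (j + 1))).map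
              (fun x => v.getD 2 0 + x) from by simp]
      rw [List.zip_map, List.map_map]
      refine (List.map_congr_left fun p _ => ?_).symm
      simp only [Function.comp, Prod.map, List.getD_cons_succ, sumTo_cons]
      refine congrArg₂ List.cons rfl (congrArg₂ List.cons rfl (congrArg₂ List.cons ?_ rfl))
      ring

lemma last_zero_cons_map (L : List Nat) :
    (0 :: L.map (· + 1)).getLast? = some (((L.getLast?).map (· + 1)).getD 0) := by
  rw [List.getLast?_cons, List.getLast?_map]

lemma tailSum_char (ds : List (List Int)) (f : Int) :
    tailSum ds f = sumTo ds ds.length -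
      (match (emIx ds).getLast? with | some j => sumTo ds (j + 1) | none => -f) := by
  have hm : ∀ (o : Option Nat) (g : Nat → Int) (z : Int),
      (match o with | some j => g j | none => z) = (o.map g).getD z := by
    intro o g z; rcases o with _ | j <;> rfl
  rw [hm]
  induction ds generalizing f with
  | nil => simp [tailSum, emIx, sumTo]
  | cons v t ih =>
    rw [emIx_cons]
    by_cases h : pvEmit v
    · have hL : tailSum (v :: t) f = tailSum t 0 := by simp [tailSum, h]
      rw [if_pos h, hL, ih 0, last_zero_cons_map]
      rcases hE : (emIx t).getLast? with _ | j
      · simp only [Option.map_none, Option.getD_none, Option.map_some, Option.getD_some,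
          List.length_cons, sumTo_cons, sumTo_zero]
        ring
      · simp only [Option.map_some, Option.getD_some, List.length_cons, sumTo_cons]
        ring
    · have hL : tailSum (v :: t) f = tailSum t (f + v.getD 2 0) := by simp [tailSum, h]
      rw [if_neg h, hL, ih (f + v.getD 2 0), List.getLast?_map]
      rcases hE : (emIx t).getLast? with _ | j
      · simp only [Option.map_none, Option.getD_none, List.length_cons, sumTo_cons]
        ring
      · simp only [Option.map_some, Option.getD_some, List.length_cons, sumTo_cons]
        ring

def mbc (ds : List (List Int)) (k : Nat) : Int := (ds.getLast?.getD [0, 0, 0]).getD k 0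

def bAlg (ds : List (List Int)) : List (List Int) :=
  let S := ds.foldl (fun (S : List Int) v => S ++ [S.getLastD 0 + v.getD 2 0]) [0]
  let emits := (List.range ds.length).filter (fun i => pvEmit (ds.getD i []))
  let e := (List.zip (0 :: emits.map (· + 1)) emits).map
    (fun qi => [(ds.getD qi.2 []).getD 0 0, (ds.getD qi.2 []).getD 1 0,
                S.getD (qi.2 + 1) 0 - S.getD qi.1 0])
  let tail := S.getD ds.length 0 -
    (match emits.getLast? with | some j => S.getD (j + 1) 0 | none => 0)
  if tail ≠ 0 then
    let last := ds.getLast?.getD [0, 0, 0]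
    e ++ [[last.getD 0 0, last.getD 1 0, tail]]
  else e

lemma A_shape (a : List (List Int)) :
    fun_c a =
      (if tailSum ((List.range (a.length - 1)).map (dvec a)) 0 ≠ 0 then
         emitList ((List.range (a.length - 1)).map (dvec a)) 0 ++
           [[mbc ((List.range (a.length - 1)).map (dvec a)) 0,
             mbc ((List.range (a.length - 1)).map (dvec a)) 1,
             tailSum ((List.range (a.length - 1)).map (dvec a)) 0]]
       else emitList ((List.range (a.length - 1)).map (dvec a)) 0) := by
  have hA : fun_c a =
      (let s := List.foldl (stepA a) ([], 0, 0, 0) (List.range (a.length - 1))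
       if s.2.1 ≠ 0 then s.1 ++ [[s.2.2.1, s.2.2.2, s.2.1]] else s.1) := rfl
  rw [hA]
  simp only [fold_inv, foldB_char, List.nil_append]
  rcases hX : ((List.range (a.length - 1)).map (dvec a)).getLast? with _ | v
  · simp [mbc, hX]
  · simp [mbc, hX]

lemma bAlg_eq (ds : List (List Int)) :
    bAlg ds = (if tailSum ds 0 ≠ 0 then
                 emitList ds 0 ++ [[mbc ds 0, mbc ds 1, tailSum ds 0]]
               else emitList ds 0) := by
  have hS : List.foldl (fun (S : List Int) v => S ++ [S.getLastD 0 + v.getD 2 0]) [0] ds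
      = 0 :: scanD ds 0 := by simpa using scanD_foldl ds [] 0
  have hE : (List.range ds.length).filter (fun i => pvEmit (ds.getD i [])) = emIx ds := rfl
  have htail : (0 :: scanD ds 0).getD ds.length 0 -
        (match (emIx ds).getLast? with
         | some j => (0 :: scanD ds 0).getD (j + 1) 0
         | none => 0) = tailSum ds 0 := by
    rw [tailSum_char ds 0, getD_scanD ds 0 ds.length le_rfl]
    rcases hX : (emIx ds).getLast? with _ | j
    · norm_num
    · have hj : j < ds.length := mem_emIx_lt ds j (List.mem_of_getLast? hX)
      have h2 : (0 :: scanD ds 0).getD (j + 1) 0 = 0 + sumTo ds (j + 1) :=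
        getD_scanD ds 0 (j + 1) (by omega)
      simp only [h2]
      norm_num
  have hemit : (List.zip (0 :: (emIx ds).map (· + 1)) (emIx ds)).map
        (fun qi => [(ds.getD qi.2 []).getD 0 0, (ds.getD qi.2 []).getD 1 0,
                    (0 :: scanD ds 0).getD (qi.2 + 1) 0 - (0 :: scanD ds 0).getD qi.1 0])
      = emitList ds 0 := by
    rw [emitList_char ds 0]
    have hq : ((-(0 : Int)) :: (emIx ds).map (fun j => sumTo ds (j + 1)))
        = (0 :: (emIx ds).map (· + 1)).map (fun q => sumTo ds q) := by
      simp [List.map_map, Function.comp, sumTo]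
    rw [hq, List.zip_map_left, List.map_map]
    refine List.map_congr_left fun p hp => ?_
    obtain ⟨q, i⟩ := p
    obtain ⟨h1, h2⟩ := List.of_mem_zip hp
    have hb2 : i < ds.length := mem_emIx_lt ds i h2
    have hb1 : q ≤ ds.length := by
      rcases List.mem_cons.mp h1 with h | h
      · omega
      · obtain ⟨j, hj, rfl⟩ := List.mem_map.mp h
        have := mem_emIx_lt ds j hj
        omega
    rw [getD_scanD ds 0 (i + 1) (by omega), getD_scanD ds 0 q hb1]
    simp [Prod.map]
  simp only [bAlg, hS, hE]
  rw [htail, hemit]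
  rfl

lemma fun_c_eq_alt (a : List (List Int)) : fun_c a = fun_c_alt a := by
  have hB : fun_c_alt a = bAlg ((List.range (a.length - 1)).map (dvec a)) := rfl
  rw [A_shape, hB, bAlg_eq]

-- ===== VERDICT (by name: the statement is the Claim_ definition above) =====
theorem fun_c_spec : Claim_equal_fun_c := by
  intro a _ _
  exact fun_c_eq_alt a
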